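-- pv_equiv track=rewrite | github.com/jamesalv/Thesis-HateXplain | dataCollector.py | process_rationale_mask
-- ===== SOURCE A (Python) =====
-- from typing import Dict, List, Tuple, Union, Any
--
-- def process_rationale_mask(text_tokens: List[str], mask: List[int]) -> Tuple[List[str], List[int]]:
--     """
--     Process a rationale mask to identify contiguous segments of highlighted text.
--
--     Args:
--         text_tokens: Original text tokens
--         mask: Binary mask where 1 indicates a highlighted token
--
--     Returns:
--         A tuple of (text segments, corresponding masks)
--     """
--     # Handle case where mask is [-1, -1, ...] (no rationale provided)
--     if mask[0] == -1:
--         mask = [0] * len(mask)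
--
--     # Find breakpoints (transitions between highlighted and non-highlighted)
--     breakpoints = []
--     mask_values = []
--
--     # Always start with position 0
--     breakpoints.append(0)
--     mask_values.append(mask[0])
--
--     # Find transitions in the mask
--     for i in range(1, len(mask)):
--         if mask[i] != mask[i-1]:
--             breakpoints.append(i)
--             mask_values.append(mask[i])
--
--     # Always end with the length of the text
--     if breakpoints[-1] != len(mask):
--         breakpoints.append(len(mask))
--
--     # Create segments based on breakpoints
--     segments = []
--     for i in range(len(breakpoints) - 1):
--         start = breakpoints[i]
--         end = breakpoints[i+1]
--         segments.append((text_tokens[start:end], mask_values[i]))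
--
--     return segments
-- ===== SOURCE B (Python) =====
-- def process_rationale_mask(text_tokens, mask):
--     # Single grouping pass over the mask: accumulate contiguous runs of equal
--     # mask values, flushing a (slice, value) segment at each transition.
--     if mask[0] == -1:
--         mask = [0] * len(mask)
--     segments = []
--     start = 0
--     cur = mask[0]
--     for i, v in enumerate(mask):
--         if v != cur:
--             segments.append((text_tokens[start:i], cur))
--             start, cur = i, v
--     segments.append((text_tokens[start:len(mask)], cur))
--     return segments
-- ===== Notes on version B (the rewrite author's own statement) =====
-- stated objective: simpler
-- what changed: Replaces A's two-phase build-breakpoint/value-tables-then-slice-by-index with a single grouping pass over the mask that tracks the current run's start and value and emits each (slice, value) segment at every transition, flushing the final run after the loop.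
import Mathlib
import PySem

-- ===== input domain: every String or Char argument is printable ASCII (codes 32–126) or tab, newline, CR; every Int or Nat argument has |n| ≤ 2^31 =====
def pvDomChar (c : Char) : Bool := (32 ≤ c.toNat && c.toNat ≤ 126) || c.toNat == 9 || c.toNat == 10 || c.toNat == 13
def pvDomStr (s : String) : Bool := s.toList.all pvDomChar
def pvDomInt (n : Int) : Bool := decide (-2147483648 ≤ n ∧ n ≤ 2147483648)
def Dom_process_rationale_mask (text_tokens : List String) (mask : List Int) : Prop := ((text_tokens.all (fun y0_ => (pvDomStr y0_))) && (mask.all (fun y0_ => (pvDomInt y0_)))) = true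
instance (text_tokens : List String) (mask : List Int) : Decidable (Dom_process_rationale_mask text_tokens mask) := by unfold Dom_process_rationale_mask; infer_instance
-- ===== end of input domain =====

-- B replaces A's breakpoint/value tables + index-slicing second pass by one grouping pass
-- (run start + current value, flush a segment at each transition); objective: simpler.

-- ===== PORT A =====
-- the transition loop: st = (breakpoints, mask_values)
def pvStepA (m : List Int) (st : List Int × List Int) (i : Int) : List Int × List Int :=
  if PySem.List.pyGetD m i 0 ≠ PySem.List.pyGetD m (i - 1) 0 then
    (st.1 ++ [i], st.2 ++ [PySem.List.pyGetD m i 0])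
  else st

def pvATrans (m : List Int) : List Int × List Int :=
  (PySem.List.pyRange 1 (m.length : Int) 1).foldl (pvStepA m) ([0], [PySem.List.pyGetD m 0 0])

-- second loop: segments from the breakpoint table
def pvASegs (text_tokens : List String) (bps mvs : List Int) : List (List String × Int) :=
  (PySem.List.pyRange 0 ((bps.length : Int) - 1) 1).foldl
    (fun segs i =>
      segs ++ [(PySem.List.slice text_tokens (some (PySem.List.pyGetD bps i 0))
                  (some (PySem.List.pyGetD bps (i + 1) 0)),
                PySem.List.pyGetD mvs i 0)])
    []

def process_rationale_mask (text_tokens : List String) (mask : List Int) : List (List String × Int) :=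
  -- mask[0] raises IndexError on an empty mask: excluded by Pre_; pyGetD's default is never used there
  let m := if PySem.List.pyGetD mask 0 0 = -1 then List.replicate mask.length (0 : Int) else mask
  let st := pvATrans m
  let breakpoints :=
    if PySem.List.pyGetD st.1 (-1) 0 ≠ (m.length : Int) then st.1 ++ [(m.length : Int)] else st.1
  pvASegs text_tokens breakpoints st.2

-- ===== PORT B =====
-- st = (segments, start, cur); one step per (index, value) of enumerate(mask)
def pvStepB (text_tokens : List String) (st : List (List String × Int) × Int × Int)
    (iv : Int × Int) : List (List String × Int) × Int × Int :=
  if iv.2 ≠ st.2.2 then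
    (st.1 ++ [(PySem.List.slice text_tokens (some st.2.1) (some iv.1), st.2.2)], iv.1, iv.2)
  else st

def pvBLoop (text_tokens : List String) (m : List Int) :
    List (List String × Int) × Int × Int :=
  (PySem.List.enumerate m 0).foldl (pvStepB text_tokens) ([], 0, PySem.List.pyGetD m 0 0)

def process_rationale_mask_alt (text_tokens : List String) (mask : List Int) : List (List String × Int) :=
  let m := if PySem.List.pyGetD mask 0 0 = -1 then List.replicate mask.length (0 : Int) else mask
  let st := pvBLoop text_tokens m
  st.1 ++ [(PySem.List.slice text_tokens (some st.2.1) (some (m.length : Int)), st.2.2)]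

-- ===== PRECONDITION & SPEC =====
-- Pre_: A evaluates mask[0], which raises IndexError iff mask is empty; nothing else raises.
def Pre_process_rationale_mask (_text_tokens : List String) (mask : List Int) : Prop := mask ≠ []
instance (text_tokens : List String) (mask : List Int) : Decidable (Pre_process_rationale_mask text_tokens mask) := by unfold Pre_process_rationale_mask; infer_instance
def pvWitness_process_rationale_mask : List String × List Int := (["a", "b", "c"], [1, 1, 0])

def Spec_process_rationale_mask (text_tokens : List String) (mask : List Int) (out : List (List String × Int)) : Prop := out = process_rationale_mask_alt text_tokens mask
instance (text_tokens : List String) (mask : List Int) (out : List (List String × Int)) : Decidable (Spec_process_rationale_mask text_tokens mask out) := by unfold Spec_process_rationale_mask; infer_instance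

-- ===== CLAIM (what is proved, stated in full; the proofs are below) =====
def Claim_equal_process_rationale_mask : Prop := ∀ (text_tokens : List String) (mask : List Int), Dom_process_rationale_mask text_tokens mask → Pre_process_rationale_mask text_tokens mask → Spec_process_rationale_mask text_tokens mask (process_rationale_mask text_tokens mask)

-- ===== LEMMAS AND PROOFS =====

-- structural "consecutive breakpoint pairs to segments" function (proof-side view of A's second loop)
def pvPairs (text_tokens : List String) : List Int → List Int → List (List String × Int)
  | b1 :: b2 :: bs, v :: vs =>
      (PySem.List.slice text_tokens (some b1) (some b2), v) :: pvPairs text_tokens (b2 :: bs) vs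
  | _, _ => []

lemma pvGetD_cons_succ (a : Int) (l : List Int) (k : Nat) (d : Int) :
    PySem.List.pyGetD (a :: l) ((k : Int) + 1) d = PySem.List.pyGetD l (k : Int) d := by
  rw [show ((k : Int) + 1) = (((k + 1 : Nat)) : Int) by push_cast; ring,
      PySem.List.pyGetD_natCast, PySem.List.pyGetD_natCast, List.getD_cons_succ]

lemma pvMapPairs (tt : List String) (bps mvs : List Int) (h : bps.length = mvs.length + 1) :
    (List.range mvs.length).map
      ((fun i => (PySem.List.slice tt (some (PySem.List.pyGetD bps i 0))
            (some (PySem.List.pyGetD bps (i + 1) 0)), PySem.List.pyGetD mvs i 0)) ∘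
        (fun k : Nat => (k : Int))) =
    pvPairs tt bps mvs := by
  induction mvs generalizing bps with
  | nil =>
      cases bps with
      | nil => simp at h
      | cons b1 bs =>
          cases bs with
          | nil => simp [pvPairs]
          | cons b2 bs' => simp at h
  | cons v vs ih =>
      match bps, h with
      | b1 :: b2 :: bs, h =>
        have h' : (b2 :: bs).length = vs.length + 1 := by simpa using h
        rw [List.length_cons, List.range_succ_eq_map, List.map_cons, List.map_map]
        have hhead : ((fun i => (PySem.List.slice tt (some (PySem.List.pyGetD (b1 :: b2 :: bs) i 0))
              (some (PySem.List.pyGetD (b1 :: b2 :: bs) (i + 1) 0)),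
              PySem.List.pyGetD (v :: vs) i 0)) ∘ (fun k : Nat => (k : Int))) 0 =
            (PySem.List.slice tt (some b1) (some b2), v) := by
          show (PySem.List.slice tt (some (PySem.List.pyGetD (b1 :: b2 :: bs) ((0 : Nat) : Int) 0))
                  (some (PySem.List.pyGetD (b1 :: b2 :: bs) (((0 : Nat) : Int) + 1) 0)),
                PySem.List.pyGetD (v :: vs) ((0 : Nat) : Int) 0) = _
          rw [pvGetD_cons_succ b1 (b2 :: bs) 0 0]
          simp
        have htail : ∀ k : Nat,
            ((fun i => (PySem.List.slice tt (some (PySem.List.pyGetD (b1 :: b2 :: bs) i 0))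
              (some (PySem.List.pyGetD (b1 :: b2 :: bs) (i + 1) 0)),
              PySem.List.pyGetD (v :: vs) i 0)) ∘ (fun k : Nat => (k : Int))) (Nat.succ k) =
            ((fun i => (PySem.List.slice tt (some (PySem.List.pyGetD (b2 :: bs) i 0))
              (some (PySem.List.pyGetD (b2 :: bs) (i + 1) 0)),
              PySem.List.pyGetD vs i 0)) ∘ (fun k : Nat => (k : Int))) k := by
          intro k
          show (PySem.List.slice tt (some (PySem.List.pyGetD (b1 :: b2 :: bs) ((Nat.succ k : Nat) : Int) 0))
                  (some (PySem.List.pyGetD (b1 :: b2 :: bs) (((Nat.succ k : Nat) : Int) + 1) 0)),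
                PySem.List.pyGetD (v :: vs) ((Nat.succ k : Nat) : Int) 0) =
               (PySem.List.slice tt (some (PySem.List.pyGetD (b2 :: bs) ((k : Nat) : Int) 0))
                  (some (PySem.List.pyGetD (b2 :: bs) (((k : Nat) : Int) + 1) 0)),
                PySem.List.pyGetD vs ((k : Nat) : Int) 0)
          have e1 : ((Nat.succ k : Nat) : Int) = (k : Int) + 1 := by push_cast; ring
          rw [e1, show ((k : Int) + 1 + 1) = (((k + 1 : Nat)) : Int) + 1 by push_cast; ring,
              pvGetD_cons_succ b1 (b2 :: bs) (k + 1) 0,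
              show (((k + 1 : Nat)) : Int) = (k : Int) + 1 by push_cast; ring,
              pvGetD_cons_succ b1 (b2 :: bs) k 0, pvGetD_cons_succ v vs k 0]
        rw [show pvPairs tt (b1 :: b2 :: bs) (v :: vs) =
              (PySem.List.slice tt (some b1) (some b2), v) :: pvPairs tt (b2 :: bs) vs from rfl]
        rw [hhead]
        congr 1
        exact (List.map_congr_left (fun k _ => htail k)).trans (ih (b2 :: bs) h')

lemma pvGetD_append_left (m : List Int) (x : Int) (i : Int) (h0 : 0 ≤ i) (h1 : i < m.length) :
    PySem.List.pyGetD (m ++ [x]) i 0 = PySem.List.pyGetD m i 0 := by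
  have h1' : i.toNat < m.length := by omega
  rw [PySem.List.pyGetD_eq_getElem (m ++ [x]) 0 h0 (by simp; omega),
      PySem.List.pyGetD_eq_getElem m 0 h0 h1]
  exact List.getElem_append_left h1' 

lemma pvGetD_zero_ne_nil (m : List Int) (x : Int) (hm : m ≠ []) :
    PySem.List.pyGetD (m ++ [x]) 0 0 = PySem.List.pyGetD m 0 0 := by
  cases m with
  | nil => exact absurd rfl hm
  | cons a as => simp [PySem.List.pyGetD_zero_cons]

lemma pvSnocA (m : List Int) (x : Int) (hm : m ≠ []) :
    pvATrans (m ++ [x]) =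
      (if x ≠ PySem.List.pyGetD m (-1) 0 then
        ((pvATrans m).1 ++ [(m.length : Int)], (pvATrans m).2 ++ [x])
      else pvATrans m) := by
  have hn : (1 : Int) ≤ (m.length : Int) := by
    cases m with
    | nil => exact absurd rfl hm
    | cons a as => simp
  have hlen : ((m ++ [x]).length : Int) = (m.length : Int) + 1 := by simp
  have hx1 : PySem.List.pyGetD (m ++ [x]) (m.length : Int) 0 = x := by
    rw [PySem.List.pyGetD_eq_getElem (m ++ [x]) 0 (by omega) (by simp)]
    simp
  have hx2 : PySem.List.pyGetD (m ++ [x]) ((m.length : Int) - 1) 0 =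
      PySem.List.pyGetD m (-1) 0 := by
    rw [pvGetD_append_left m x ((m.length : Int) - 1) (by omega) (by omega),
        PySem.List.pyGetD_neg_one m 0 hm,
        PySem.List.pyGetD_eq_getElem m 0 (by omega) (by omega),
        List.getLast_eq_getElem]
    congr 1
    omega
  have hcong : List.foldl (pvStepA (m ++ [x])) ([0], [PySem.List.pyGetD m 0 0])
        (PySem.List.pyRange 1 (m.length : Int) 1) =
      List.foldl (pvStepA m) ([0], [PySem.List.pyGetD m 0 0])
        (PySem.List.pyRange 1 (m.length : Int) 1) := by
    refine PySem.List.foldl_congr_mem _ _ _ _ ?_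
    intro acc i hi
    rw [PySem.List.mem_pyRange_one] at hi
    unfold pvStepA
    rw [pvGetD_append_left m x i (by omega) (by omega),
        pvGetD_append_left m x (i - 1) (by omega) (by omega)]
  unfold pvATrans
  rw [hlen, PySem.List.pyRange_one_succ_right hn, List.foldl_append,
      pvGetD_zero_ne_nil m x hm, hcong]
  show pvStepA (m ++ [x])
      (List.foldl (pvStepA m) ([0], [PySem.List.pyGetD m 0 0])
        (PySem.List.pyRange 1 (m.length : Int) 1)) ((m.length : Int)) = _
  unfold pvStepA
  rw [hx1, hx2]

lemma pvEnumAppend {α : Type} (xs : List α) (x : α) (s : Int) :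
    PySem.List.enumerate (xs ++ [x]) s = PySem.List.enumerate xs s ++ [(s + xs.length, x)] := by
  induction xs generalizing s with
  | nil => simp [PySem.List.enumerate_cons, PySem.List.enumerate_nil]
  | cons a as ih =>
      have harith : ∀ t : Int, s + 1 + t = s + (t + 1) := by intro t; ring
      simp only [List.cons_append, PySem.List.enumerate_cons, ih, List.length_cons,
        Nat.cast_add, Nat.cast_one, harith]

lemma pvSnocB (tt : List String) (m : List Int) (x : Int) (hm : m ≠ []) :
    pvBLoop tt (m ++ [x]) =
      pvStepB tt (pvBLoop tt m) ((m.length : Int), x) := by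
  unfold pvBLoop
  rw [pvEnumAppend, List.foldl_append, pvGetD_zero_ne_nil m x hm]
  simp

lemma pvPairsSnoc (tt : List String) (bs : List Int) (vs : List Int) (b e v : Int)
    (h : bs.length = vs.length) :
    pvPairs tt (bs ++ [b, e]) (vs ++ [v]) =
      pvPairs tt (bs ++ [b]) vs ++ [(PySem.List.slice tt (some b) (some e), v)] := by
  induction bs generalizing vs with
  | nil =>
      cases vs with
      | nil => simp [pvPairs]
      | cons v1 vs' => simp at h
  | cons b1 bs ih =>
      cases vs with
      | nil => simp at h
      | cons v1 vs' =>
          cases bs with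
          | nil =>
              have hvs : vs' = [] := by simpa using h
              subst hvs
              simp [pvPairs]
          | cons b2 bs' =>
              have h' : (b2 :: bs').length = vs'.length := by simpa using h
              have hih := ih vs' h'
              simp only [List.cons_append] at hih
              simp only [List.cons_append, pvPairs]
              rw [hih]

lemma pvASegsEq (tt : List String) (bps mvs : List Int) (h : bps.length = mvs.length + 1) :
    pvASegs tt bps mvs = pvPairs tt bps mvs := by
  unfold pvASegs
  rw [PySem.List.foldl_append_singleton_eq_map
        (fun i => (PySem.List.slice tt (some (PySem.List.pyGetD bps i 0))
                    (some (PySem.List.pyGetD bps (i + 1) 0)), PySem.List.pyGetD mvs i 0))]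
  have hcast : (bps.length : Int) - 1 = ((mvs.length : Nat) : Int) := by
    rw [h]; push_cast; ring
  rw [List.nil_append, hcast, PySem.List.pyRange_zero_natCast, List.map_map]
  exact pvMapPairs tt bps mvs h

lemma pvInv (tt : List String) (m : List Int) (hm : m ≠ []) :
    (pvATrans m).1.length = (pvATrans m).2.length ∧
    PySem.List.pyGetD (pvATrans m).1 (-1) 0 = (pvBLoop tt m).2.1 ∧
    (pvBLoop tt m).2.1 < (m.length : Int) ∧
    (pvBLoop tt m).2.2 = PySem.List.pyGetD m (-1) 0 ∧
    (∀ e : Int, pvPairs tt ((pvATrans m).1 ++ [e]) (pvATrans m).2 =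
      (pvBLoop tt m).1 ++
        [(PySem.List.slice tt (some (pvBLoop tt m).2.1) (some e), (pvBLoop tt m).2.2)]) := by
  induction m using List.reverseRecOn with
  | nil => exact absurd rfl hm
  | append_singleton m x ih =>
      by_cases hm0 : m = []
      · -- singleton base case: m ++ [x] = [x]
        subst hm0
        have ha : pvATrans ([] ++ [x]) = ([0], [x]) := by
          unfold pvATrans
          rw [show (([] ++ [x] : List Int).length : Int) = 1 by simp,
              PySem.List.pyRange_one_eq_nil (by omega)]
          simp [PySem.List.pyGetD_zero_cons]
        have hb : pvBLoop tt ([] ++ [x]) = ([], 0, x) := by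
          unfold pvBLoop
          rw [show (([] ++ [x] : List Int)) = [x] from rfl]
          rw [show PySem.List.enumerate [x] 0 = [(0, x)] by
            rw [PySem.List.enumerate_cons]; rfl]
          simp [pvStepB, PySem.List.pyGetD_zero_cons]
        refine ⟨by rw [ha]; rfl, by rw [ha, hb]; rfl, by rw [hb]; simp, ?_, ?_⟩
        · rw [hb, show (([] ++ [x] : List Int)) = [x] from rfl,
              PySem.List.pyGetD_neg_one [x] 0 (by simp)]
          rfl
        · intro e
          rw [ha, hb]
          show pvPairs tt [0, e] [x] = _
          rw [show pvPairs tt [0, e] [x] =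
                [(PySem.List.slice tt (some 0) (some e), x)] from rfl]
          rfl
      · -- inductive step
        obtain ⟨l, la, lt, cu, pp⟩ := ih hm0
        rw [pvSnocA m x hm0, pvSnocB tt m x hm0]
        unfold pvStepB
        by_cases hx : x = PySem.List.pyGetD m (-1) 0
        · -- no transition: both states unchanged
          rw [if_neg (by simp [hx]), if_neg (by rw [cu]; simp [hx])]
          exact ⟨l, la, by simp; omega,
            by rw [PySem.List.pyGetD_neg_one_append_singleton, cu, hx], pp⟩
        · -- transition: A appends a breakpoint, B flushes a segment
          rw [if_pos hx, if_pos (show ((m.length : Int), x).2 ≠ (pvBLoop tt m).2.2 by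
            rw [cu]; exact hx)]
          refine ⟨by simp [l], PySem.List.pyGetD_neg_one_append_singleton _ _ 0,
            by simp, by rw [PySem.List.pyGetD_neg_one_append_singleton], ?_⟩
          intro e
          rw [List.append_assoc, show ([(m.length : Int)] ++ [e]) = [(m.length : Int), e] from rfl,
              pvPairsSnoc tt (pvATrans m).1 (pvATrans m).2 (m.length : Int) e x l,
              pp ((m.length : Int))]

-- ===== VERDICT (by name: the statement is the Claim_ definition above) =====
theorem process_rationale_mask_spec : Claim_equal_process_rationale_mask := by
  intro tt mask _ hpre
  unfold Spec_process_rationale_mask process_rationale_mask process_rationale_mask_alt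
  set m := if PySem.List.pyGetD mask 0 0 = -1 then List.replicate mask.length (0 : Int) else mask with hmdef
  have hm : m ≠ [] := by
    rw [hmdef]; split
    · simpa using hpre
    · exact hpre
  obtain ⟨hlen, hlast, hlt, hcur, hpairs⟩ := pvInv tt m hm
  have hcond : PySem.List.pyGetD (pvATrans m).1 (-1) 0 ≠ (m.length : Int) := by
    rw [hlast]; omega
  simp only [hcond, if_pos, ne_eq, not_false_iff]
  rw [pvASegsEq tt _ _ (by simp [hlen]), hpairs ((m.length : Int))]
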